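-- pv_equiv track=rewrite | github.com/Lizz-dankova/LAB | lab1.py | LongShiftBitsToLow
-- ===== SOURCE A (Python) =====
-- def LongShiftBitsToLow(number, width_shift):
--     if width_shift <= 0:
--         return number
--     remainder = width_shift % 32
--     width_shift //= 32
--     result = number[width_shift:] if width_shift < len(number) else [0]
--     if remainder > 0:
--         for _ in range(remainder):
--             last_bit = (result[0] & 1) << 31
--             for j in range(len(result) - 1):
--                 result[j] = ((result[j] >> 1) | ((result[j + 1] & 1) << 31)) & 0xFFFFFFFF
--             result[-1] = ((result[-1] >> 1) | last_bit) & 0xFFFFFFFF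
--     while len(result) > 1 and result[-1] == 0:
--         result.pop()
--     return result
-- ===== SOURCE B (Python) =====
-- def LongShiftBitsToLow(number, width_shift):
--     # Single zip pass: each output word takes its own high bits and the low bits
--     # of its cyclic successor; the 33-bit mask keeps the two's-complement carry
--     # bit of negative words, exactly as repeated 1-bit shifting does.
--     if width_shift <= 0:
--         return number
--     r = width_shift % 32
--     q = width_shift // 32
--     res = number[q:] if q < len(number) else [0]
--     if r > 0:
--         nxt = res[1:] + res[:1]
--         res = [((x & 0x1FFFFFFFF) >> r) | ((y << (32 - r)) & 0xFFFFFFFF)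
--                for x, y in zip(res, nxt)]
--     while len(res) > 1 and res[-1] == 0:
--         res.pop()
--     return res
-- ===== Notes on version B (the rewrite author's own statement) =====
-- stated objective: faster
-- what changed: replaces the remainder-many in-place 1-bit rotation passes by a single zip pass that builds each output word directly from its own high bits and its cyclic successor's low bits (a 33-bit mask carries the two's-complement bit of negative words)
import Mathlib
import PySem

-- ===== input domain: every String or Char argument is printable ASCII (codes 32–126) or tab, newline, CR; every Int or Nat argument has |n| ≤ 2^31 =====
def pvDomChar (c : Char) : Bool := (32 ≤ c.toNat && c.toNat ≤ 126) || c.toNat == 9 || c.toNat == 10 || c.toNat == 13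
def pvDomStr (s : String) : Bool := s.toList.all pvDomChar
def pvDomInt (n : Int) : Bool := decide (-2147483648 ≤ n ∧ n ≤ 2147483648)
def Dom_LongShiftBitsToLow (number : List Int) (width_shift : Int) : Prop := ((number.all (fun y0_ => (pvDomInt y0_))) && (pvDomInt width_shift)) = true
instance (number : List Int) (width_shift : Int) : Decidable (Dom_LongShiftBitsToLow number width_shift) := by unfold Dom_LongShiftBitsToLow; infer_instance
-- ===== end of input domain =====

-- B replaces A's remainder-many in-place 1-bit passes by one zip pass per word (same return value; neither version mutates its arguments).

-- ===== PORT A =====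
-- shared with port B: Python's `while len(result) > 1 and result[-1] == 0: result.pop()` (identical text in both sources)
def pvPopTrailing (res : List Int) : List Int :=
  if h : 1 < res.length ∧ res.getLast? = some 0 then pvPopTrailing res.dropLast else res
termination_by res.length
decreasing_by simp only [List.length_dropLast]; omega

-- one pass of A's inner `for j in range(len(result)-1)` loop plus the final `result[-1] = ...` assignment
def pvA_once (res : List Int) : List Int :=
  let lastBit : Int := (PySem.Int.band (res.getD 0 0) 1) <<< (31:Nat)
  let res2 := (List.range (res.length - 1)).foldl
    (fun acc j => acc.set j (PySem.Int.band (PySem.Int.bor ((acc.getD j 0) >>> (1:Nat))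
      ((PySem.Int.band (acc.getD (j+1) 0) 1) <<< (31:Nat))) 4294967295)) res
  res2.set (res2.length - 1)
    (PySem.Int.band (PySem.Int.bor ((res2.getD (res2.length - 1) 0) >>> (1:Nat)) lastBit) 4294967295)

-- A's outer `for _ in range(remainder)` loop
def pvA_shift : Nat → List Int → List Int
  | 0, res => res
  | n+1, res => pvA_once (pvA_shift n res)

def LongShiftBitsToLow (number : List Int) (width_shift : Int) : List Int :=
  if width_shift ≤ 0 then number
  else
    let remainder := PySem.Int.mod width_shift 32
    let ws := PySem.Int.floordiv width_shift 32
    let result := if ws < (number.length : Int) then PySem.List.slice number (some ws) none else [0]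
    let result := if 0 < remainder then pvA_shift remainder.toNat result else result
    pvPopTrailing result

-- ===== PORT B =====
def LongShiftBitsToLow_alt (number : List Int) (width_shift : Int) : List Int :=
  if width_shift ≤ 0 then number
  else
    let r := PySem.Int.mod width_shift 32
    let q := PySem.Int.floordiv width_shift 32
    let res : List Int := if q < (number.length : Int) then PySem.List.slice number (some q) none else [0]
    let res : List Int := if 0 < r then
        let nxt := res.drop 1 ++ res.take 1
        (res.zip nxt).map (fun (p : Int × Int) =>
          PySem.Int.bor ((PySem.Int.band p.1 8589934591) >>> r.toNat)
            (PySem.Int.band (p.2 <<< (32 - r.toNat)) 4294967295))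
      else res
    pvPopTrailing res

-- ===== PRECONDITION & SPEC =====
def Spec_LongShiftBitsToLow (number : List Int) (width_shift : Int) (out : List Int) : Prop := out = LongShiftBitsToLow_alt number width_shift
instance (number : List Int) (width_shift : Int) (out : List Int) : Decidable (Spec_LongShiftBitsToLow number width_shift out) := by unfold Spec_LongShiftBitsToLow; infer_instance

-- ===== CLAIM (what is proved, stated in full; the proofs are below) =====
def Claim_equal_LongShiftBitsToLow : Prop := ∀ (number : List Int) (width_shift : Int), Dom_LongShiftBitsToLow number width_shift → Spec_LongShiftBitsToLow number width_shift (LongShiftBitsToLow number width_shift)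


-- ===== LEMMAS AND PROOFS =====

-- A's per-pair combination and B's per-pair combination, as named functions
def pvF (x y : Int) : Int :=
  PySem.Int.band (PySem.Int.bor (x >>> (1:Nat)) ((PySem.Int.band y 1) <<< (31:Nat))) 4294967295

def pvG (r : Nat) (x y : Int) : Int :=
  PySem.Int.bor ((PySem.Int.band x 8589934591) >>> r) (PySem.Int.band (y <<< (32 - r)) 4294967295)

-- Nat-level counterparts
def pvAN (x : Int) : Nat := (x % 8589934592).toNat
def pvGN (r : Nat) (a b : Nat) : Nat := (a >>> r) ||| ((b <<< (32 - r)) % 4294967296)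


lemma pv_or_add_and : ∀ (a b : Nat), (a ||| b) + (a &&& b) = a + b := by
  intro a
  induction a using Nat.strong_induction_on with
  | _ a ih =>
    intro b
    rcases Nat.eq_zero_or_pos a with ha | ha
    · simp [ha]
    · have h2 : a / 2 < a := Nat.div_lt_self ha (by omega)
      have ihb := ih (a/2) h2 (b/2)
      have hod : (a ||| b) / 2 = a/2 ||| b/2 := Nat.or_div_two
      have had : (a &&& b) / 2 = a/2 &&& b/2 := Nat.and_div_two
      have hom : (a ||| b) % 2 = 1 ↔ (a % 2 = 1 ∨ b % 2 = 1) := by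
        have := Nat.testBit_lor a b 0
        simp [Nat.testBit_eq_decide_div_mod_eq] at this
        simp [this]
      have ham : (a &&& b) % 2 = 1 ↔ (a % 2 = 1 ∧ b % 2 = 1) := by
        have := Nat.testBit_land a b 0
        simp [Nat.testBit_eq_decide_div_mod_eq] at this
        simp [this]
      omega

lemma pv_band32 (x : Int) : PySem.Int.band x 4294967295 = ((x % 4294967296).toNat : Int) := by
  rcases le_or_gt 0 x with hx | hx
  · rw [PySem.Int.band_of_nonneg hx (by norm_num)]
    have : x.toNat &&& (4294967295:Int).toNat = x.toNat % 4294967296 := by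
      have := Nat.and_two_pow_sub_one_eq_mod x.toNat 32
      norm_num at this ⊢
      exact this
    rw [this]; omega
  · have hx' : ¬ (0 ≤ x) := by omega
    simp only [PySem.Int.band, if_neg hx', if_pos (by norm_num : (0:Int) ≤ 4294967295)]
    have : (4294967295:Int).toNat &&& (-x-1).toNat = (-x-1).toNat % 4294967296 := by
      rw [Nat.land_comm]
      have := Nat.and_two_pow_sub_one_eq_mod (-x-1).toNat 32
      norm_num at this ⊢
      exact this
    rw [this]; omega

lemma pv_band33 (x : Int) : PySem.Int.band x 8589934591 = ((x % 8589934592).toNat : Int) := by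
  rcases le_or_gt 0 x with hx | hx
  · rw [PySem.Int.band_of_nonneg hx (by norm_num)]
    have : x.toNat &&& (8589934591:Int).toNat = x.toNat % 8589934592 := by
      have := Nat.and_two_pow_sub_one_eq_mod x.toNat 33
      norm_num at this ⊢
      exact this
    rw [this]; omega
  · have hx' : ¬ (0 ≤ x) := by omega
    simp only [PySem.Int.band, if_neg hx', if_pos (by norm_num : (0:Int) ≤ 8589934591)]
    have : (8589934591:Int).toNat &&& (-x-1).toNat = (-x-1).toNat % 8589934592 := by
      rw [Nat.land_comm]
      have := Nat.and_two_pow_sub_one_eq_mod (-x-1).toNat 33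
      norm_num at this ⊢
      exact this
    rw [this]; omega

lemma pv_natCast_shiftRight (m k : Nat) : ((m : Int) >>> k) = ((m >>> k : Nat) : Int) := by
  simp [Int.shiftRight_eq_div_pow, Nat.shiftRight_eq_div_pow]
lemma pv_natCast_shiftLeft (m k : Nat) : ((m : Int) <<< k) = ((m <<< k : Nat) : Int) := by
  simp [Int.shiftLeft_eq, Nat.shiftLeft_eq]
lemma pv_zipWith_congr {α β γ : Type} (f g : α → β → γ) (h : ∀ x y, f x y = g x y) :
    ∀ (s : List α) (t : List β), List.zipWith f s t = List.zipWith g s t := by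
  intro s
  induction s with
  | nil => intro t; simp
  | cons x s ih => intro t; cases t with
    | nil => simp
    | cons y t => simp [h, ih]
lemma pv_zip_map (F : Int → Int → Int) :
    ∀ (s t : List Int), (s.zip t).map (fun p => F p.1 p.2) = List.zipWith F s t := by
  intro s
  induction s with
  | nil => intro t; simp
  | cons x s ih => intro t; cases t with
    | nil => simp
    | cons y t => simp [ih]

lemma pv_zipWith_comp {α : Type} (f2 g : α → α → α) (h : α → α → α)
    (hp : ∀ x y z, f2 (g x y) (g y z) = h x y) :
    ∀ (s t u : List α), s.length = t.length → t.length = u.length →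
      List.zipWith f2 (List.zipWith g s t) (List.zipWith g t u) = List.zipWith h s t := by
  intro s
  induction s with
  | nil => intro t u _ _; simp
  | cons x s ih =>
    intro t u h1 h2
    cases t with
    | nil => simp at h1
    | cons y t =>
      cases u with
      | nil => simp at h2
      | cons z u =>
        simp only [List.zipWith_cons_cons, hp]
        rw [ih t u (by simpa using h1) (by simpa using h2)]

lemma pv_rot_zipWith (f : Int → Int → Int) :
    ∀ (s t : List Int), s.length = t.length →
      (List.zipWith f s t).drop 1 ++ (List.zipWith f s t).take 1
        = List.zipWith f (s.drop 1 ++ s.take 1) (t.drop 1 ++ t.take 1) := by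
  intro s t h
  cases s with
  | nil =>
    have ht : t = [] := by cases t <;> simp_all
    simp [ht]
  | cons x s => cases t with
    | nil => simp at h
    | cons y t =>
      simp only [List.zipWith_cons_cons, List.drop_succ_cons, List.drop_zero,
        List.take_succ_cons, List.take_zero]
      rw [List.zipWith_append (by simpa using h)]
      simp

lemma pv_toNat_mod (N : Nat) : (((N:Int)) % 4294967296).toNat = N % 4294967296 := by omega

lemma pvG_eq (r : Nat) (x y : Int) :
    pvG r x y = ((pvGN r (pvAN x) (pvAN y) : Nat) : Int) := by
  unfold pvG pvGN pvAN
  rw [pv_band33 x, pv_band32, pv_natCast_shiftRight]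
  have hy : (y <<< (32 - r)) % 4294967296 = ((((y % 8589934592).toNat : Int)) <<< (32 - r)) % 4294967296 := by
    rw [Int.shiftLeft_eq, Int.shiftLeft_eq, Int.mul_emod, Int.mul_emod ((((y % 8589934592).toNat : Int))) _]
    have : ((y % 8589934592).toNat : Int) % 4294967296 = y % 4294967296 := by
      have h8 : (4294967296:Int) ∣ 8589934592 := by norm_num
      have := Int.emod_emod_of_dvd y h8
      omega
    rw [this]
  rw [hy, pv_natCast_shiftLeft]
  rw [PySem.Int.bor_of_nonneg (Int.natCast_nonneg _) (by positivity)]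
  rw [pv_toNat_mod, Int.toNat_natCast, Int.toNat_natCast]

lemma pvF_cast (m n : Nat) :
    pvF (m : Int) (n : Int) = ((((m >>> 1) ||| ((n % 2) <<< (31:Nat))) % 4294967296 : Nat) : Int) := by
  unfold pvF
  rw [PySem.Int.band_one, PySem.Int.mod_eq_emod_of_pos (by norm_num)]
  have hn : (n : Int) % 2 = ((n % 2 : Nat) : Int) := by omega
  rw [hn, pv_natCast_shiftLeft, pv_natCast_shiftRight,
    PySem.Int.bor_of_nonneg (Int.natCast_nonneg _) (Int.natCast_nonneg _), pv_band32]
  rw [Int.toNat_natCast, Int.toNat_natCast]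
  omega

-- helper: A &&& (t <<< 31) for a bit t, arithmetically
lemma pv_and_bit31 (A t : Nat) (ht : t ≤ 1) :
    A &&& (t <<< 31) = (A / 2147483648 % 2) * t * 2147483648 := by
  interval_cases t
  · simp
  · have h1 := Nat.and_two_pow A 31
    have h2 : A.testBit 31 = decide (A / 2 ^ 31 % 2 = 1) := Nat.testBit_eq_decide_div_mod_eq ..
    rw [h2] at h1
    have h3 : (1:Nat) <<< 31 = 2 ^ 31 := by decide
    rw [h3]
    by_cases h : A / 2 ^ 31 % 2 = 1
    · simp only [h, decide_true, Bool.toNat_true] at h1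
      norm_num at h1 ⊢
      omega
    · simp only [h, decide_false, Bool.toNat_false] at h1
      norm_num at h1 ⊢
      omega

-- helper: A ||| (t <<< 31) for a bit t, additively
lemma pv_or_bit31 (A t : Nat) (ht : t ≤ 1) :
    A ||| (t <<< 31) = A + t * 2147483648 - (A / 2147483648 % 2) * t * 2147483648 := by
  have hadd := pv_or_add_and A (t <<< 31)
  have hand := pv_and_bit31 A t ht
  have hsl : t <<< 31 = t * 2147483648 := by simp [Nat.shiftLeft_eq]
  omega

-- pure Nat core of the positive case
lemma pv_posKey (A t : Nat) (ht : t ≤ 1) :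
    ((A >>> 1 ||| t <<< 31) % 4294967296 : Nat) = ((A % 8589934592) >>> 1) ||| (t <<< 31) := by
  have h2 : ∀ B : Nat, B >>> 1 = B / 2 := fun B => by
    simpa using Nat.shiftRight_eq_div_pow B 1
  rw [h2, h2, pv_or_bit31 _ _ ht, pv_or_bit31 _ _ ht]
  rcases (by omega : t = 0 ∨ t = 1) with h0 | h0 <;> subst h0 <;> simp <;> omega

lemma pv_negKey0 (x : Int) (hx : x < 0) :
  ((((-((((-(x / 2) - 1).toNat - (-(x / 2) - 1).toNat / 2147483648 % 2 * 0 * 2147483648 : Nat)) : Int) - 1) % 4294967296).toNat : Nat) : Int) =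
    (((((x % 8589934592).toNat / 2 + 0 * 2147483648 - (x % 8589934592).toNat / 2 / 2147483648 % 2 * 0 * 2147483648) : Nat) : Int)) := by
  omega

lemma pv_negKey1 (x : Int) (hx : x < 0) :
  ((((-((((-(x / 2) - 1).toNat - (-(x / 2) - 1).toNat / 2147483648 % 2 * 1 * 2147483648 : Nat)) : Int) - 1) % 4294967296).toNat : Nat) : Int) =
    (((((x % 8589934592).toNat / 2 + 1 * 2147483648 - (x % 8589934592).toNat / 2 / 2147483648 % 2 * 1 * 2147483648) : Nat) : Int)) := by
  omega

lemma pvF_eq (x y : Int) : pvF x y = ((pvGN 1 (pvAN x) (pvAN y) : Nat) : Int) := by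
  unfold pvF pvGN pvAN
  rw [PySem.Int.band_one, PySem.Int.mod_eq_emod_of_pos (by norm_num)]
  have hy2 : y % 2 = (((y % 8589934592).toNat % 2 : Nat) : Int) := by omega
  rw [hy2, pv_natCast_shiftLeft]
  generalize hts : (y % 8589934592).toNat % 2 = t
  have ht : t ≤ 1 := by omega

  have hRor : ((y % 8589934592).toNat <<< (32 - 1)) % 4294967296 = t <<< 31 := by
    subst hts
    simp only [Nat.shiftLeft_eq]
    norm_num
    omega
  rw [hRor]
  rcases le_or_gt 0 x with hx | hx
  · rw [show x = ((x.toNat : Nat) : Int) from by omega, pv_natCast_shiftRight,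
      PySem.Int.bor_of_nonneg (Int.natCast_nonneg _) (Int.natCast_nonneg _), pv_band32,
      Int.toNat_natCast, Int.toNat_natCast]
    have h1 : ((((x.toNat >>> 1 ||| t <<< 31 : Nat) : Int)) % 4294967296).toNat
        = (x.toNat >>> 1 ||| t <<< 31) % 4294967296 := by omega
    rw [h1, pv_posKey _ _ ht]
    have h3 : ((x.toNat : Int) % 8589934592).toNat = x.toNat % 8589934592 := by omega
    rw [h3]
  · have hu : x >>> (1:Nat) = x / 2 := by
      simpa using Int.shiftRight_eq_div_pow x 1
    have hun : ¬ (0 ≤ x >>> (1:Nat)) := by rw [hu]; omega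
    simp only [PySem.Int.bor, if_neg hun, if_pos (Int.natCast_nonneg (t <<< 31))]
    rw [pv_band32, Int.toNat_natCast]
    have h2 : ∀ B : Nat, B >>> 1 = B / 2 := fun B => by
      simpa using Nat.shiftRight_eq_div_pow B 1
    rw [pv_and_bit31 _ _ ht, h2, pv_or_bit31 _ _ ht, hu]
    clear hun hu
    rcases (by omega : t = 0 ∨ t = 1) with h0 | h0
    · rw [h0]
      exact pv_negKey0 x hx
    · rw [h0]
      exact pv_negKey1 x hx

lemma pv_testBit_mod2 (x k : Nat) : (x % 2).testBit k = (decide (k < 1) && x.testBit k) := by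
  have := Nat.testBit_mod_two_pow x 1 k
  simpa using this

lemma pv_mod_two_testBit (n : Nat) : n % 2 = (n.testBit 0).toNat := by
  by_cases h : n % 2 = 1 <;> simp [Nat.testBit_eq_decide_div_mod_eq, h] <;> omega

lemma pv_step (r : Nat) (hr1 : 1 ≤ r) (hr2 : r ≤ 30) (a b c : Nat)
    (ha : a < 8589934592) (hb : b < 8589934592) :
    ((pvGN r a b >>> 1) ||| ((pvGN r b c % 2) <<< 31)) % 4294967296 = pvGN (r+1) a b := by
  have hlow : pvGN r b c % 2 = (b >>> r) % 2 := by
    rw [pv_mod_two_testBit, pv_mod_two_testBit]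
    have hne : ¬ ((0:Nat) ≥ 32 - r) := by omega
    have hne2 : (32:Nat) - r ≠ 0 := by omega
    simp [pvGN, Nat.testBit_lor, Nat.testBit_mod_two_pow, Nat.testBit_shiftLeft, hne, hne2]
  rw [hlow]
  have hM : (4294967296:Nat) = 2^32 := by norm_num
  apply Nat.eq_of_testBit_eq
  intro i
  rw [hM]
  simp only [pvGN, hM, Nat.testBit_mod_two_pow, Nat.testBit_lor, Nat.testBit_shiftRight,
    Nat.testBit_shiftLeft, pv_testBit_mod2]
  have hbound : ∀ (n j : Nat), n < 8589934592 → 33 ≤ j → n.testBit j = false := by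
    intro n j hn hj
    apply Nat.testBit_lt_two_pow
    calc n < 8589934592 := hn
    _ = 2^33 := by norm_num
    _ ≤ 2^j := Nat.pow_le_pow_right (by norm_num) hj
  by_cases hi : i < 32
  · by_cases hi31 : i = 31
    · subst hi31
      have e1 : r + (1 + 31) = r + 1 + 31 := by omega
      have e2 : (31:Nat) - 31 = 0 := by omega
      have e3 : r + 0 = r := by omega
      have e4 : 31 - (32 - (r+1)) = r := by omega
      simp only [e1, e2, e3, e4]
      have f1 : ¬ ((1:Nat) + 31 < 32) := by omega
      have f2 : ((31:Nat) ≥ 31) := by omega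
      have f3 : ((0:Nat) < 1) := by omega
      have f4 : ((31:Nat) ≥ 32 - (r+1)) := by omega
      have f5 : ((31:Nat) < 32) := by omega
      simp [f1, f2, f3, f4, f5]
    · -- i < 31
      have e1 : r + (1 + i) = r + 1 + i := by omega
      have f1 : ¬ (i ≥ 31) := by omega
      have f5 : (i < 32) := by omega
      have f6 : ((1:Nat) + i < 32) := by omega
      simp only [e1, f1, f5, f6, decide_true, decide_false, Bool.false_and, Bool.and_false,
        Bool.or_false, Bool.true_and, Bool.and_true]
      by_cases hc : 1 + i ≥ 32 - r
      · have hc' : i ≥ 32 - (r+1) := by omega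
        have hc2 : (31:Nat) ≤ i + r := by omega
        have e5 : 1 + i - (32 - r) = i - (32 - (r+1)) := by omega
        simp [hc, hc', e5, hc2]
      · have hc' : ¬ (i ≥ 32 - (r+1)) := by omega
        have hc2 : ¬ ((31:Nat) ≤ i + r) := by omega
        simp [hc, hc', hc2]
  · have f1 : ¬ (i < 32) := hi
    have g1 : a.testBit (r + 1 + i) = false := hbound a _ ha (by omega)
    simp [f1, g1]


lemma pv_zipWith_take_right {α : Type} (f : α → α → α) :
    ∀ (l t : List α) (k : Nat), l.length ≤ k →
      List.zipWith f l (t.take k) = List.zipWith f l t := by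
  intro l
  induction l with
  | nil => intro t k _; simp
  | cons x l ih =>
    intro t k hk
    cases t with
    | nil => simp
    | cons y t =>
      cases k with
      | zero => simp at hk
      | succ k => simp only [List.take_succ_cons, List.zipWith_cons_cons]
                  rw [ih t k (by simpa using hk)]

lemma pv_foldl_set_window (f : Int → Int → Int) (s : List Int) :
    ∀ (k : Nat), k ≤ s.length - 1 →
      (List.range k).foldl (fun acc j => acc.set j (f (acc.getD j 0) (acc.getD (j+1) 0))) s
      = (List.zipWith f (s.take k) (s.drop 1)) ++ s.drop k := by
  intro k
  induction k with
  | zero => intro _; simp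
  | succ k ih =>
    intro hk
    have hk' : k ≤ s.length - 1 := by omega
    have hk1 : k + 1 < s.length := by omega
    have hkl : k < s.length := by omega
    rw [List.range_succ, List.foldl_append, ih hk']
    have hlenz : (List.zipWith f (s.take k) (s.drop 1)).length = k := by
      rw [List.length_zipWith, List.length_take, List.length_drop]
      omega
    simp only [List.foldl_cons, List.foldl_nil]
    have hg1 : ((List.zipWith f (s.take k) (s.drop 1)) ++ s.drop k).getD k 0 = s.getD k 0 := by
      rw [List.getD_append_right _ _ _ _ (by omega), hlenz]
      simp [List.getD_eq_getElem?_getD, List.getElem?_drop]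
    have hg2 : ((List.zipWith f (s.take k) (s.drop 1)) ++ s.drop k).getD (k+1) 0 = s.getD (k+1) 0 := by
      rw [List.getD_append_right _ _ _ _ (by omega), hlenz]
      simp only [List.getD_eq_getElem?_getD, List.getElem?_drop]
      congr 2
      omega
    rw [hg1, hg2]
    rw [List.set_append_right _ _ (by omega), hlenz]
    have hdropk : s.drop k = s[k] :: s.drop (k+1) := List.drop_eq_getElem_cons hkl
    rw [hdropk]
    have hset : (s[k] :: s.drop (k+1)).set (k - k) (f (s.getD k 0) (s.getD (k+1) 0))
        = f (s.getD k 0) (s.getD (k+1) 0) :: s.drop (k+1) := by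
      rw [Nat.sub_self, List.set_cons_zero]
    rw [hset]
    have htake : s.take (k+1) = s.take k ++ [s[k]] := by
      rw [List.take_succ]
      simp [List.getElem?_eq_getElem hkl]
    rw [htake]
    conv_rhs => rw [show s.drop 1 = (s.drop 1).take k ++ (s.drop 1).drop k from (List.take_append_drop _ _).symm]
    rw [List.zipWith_append (by rw [List.length_take, List.length_take, List.length_drop]; omega)]
    have hdd : (s.drop 1).drop k = s.drop (k+1) := by rw [List.drop_drop]; congr 1; omega
    have hzt : List.zipWith f (s.take k) ((s.drop 1).take k) = List.zipWith f (s.take k) (s.drop 1) :=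
      pv_zipWith_take_right f _ _ _ (by rw [List.length_take]; omega)
    rw [hdd, hzt]
    have hdk1 : s.drop (k+1) = s[k+1] :: s.drop (k+2) := List.drop_eq_getElem_cons hk1
    rw [hdk1]
    simp only [List.zipWith_cons_cons, List.zipWith_nil_left, List.append_assoc, List.cons_append,
      List.nil_append]
    have hgd1 : s.getD k 0 = s[k] := by simp [List.getD_eq_getElem?_getD, List.getElem?_eq_getElem hkl]
    have hgd2 : s.getD (k+1) 0 = s[k+1] := by simp [List.getD_eq_getElem?_getD, List.getElem?_eq_getElem hk1]
    rw [hgd1, hgd2]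

lemma pv_zipWith_take_left {α : Type} (f : α → α → α) :
    ∀ (l t : List α) (k : Nat), t.length ≤ k →
      List.zipWith f (l.take k) t = List.zipWith f l t := by
  intro l
  induction l with
  | nil => intro t k _; simp
  | cons x l ih =>
    intro t k hk
    cases t with
    | nil => simp
    | cons y t =>
      cases k with
      | zero => simp at hk
      | succ k => simp only [List.take_succ_cons, List.zipWith_cons_cons]
                  rw [ih t k (by simpa using hk)]


lemma pv_once_eq (s : List Int) (hs : s ≠ []) :
    pvA_once s = List.zipWith pvF s (s.drop 1 ++ s.take 1) := by
  have hn : 0 < s.length := List.length_pos_iff.mpr hs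
  have hwin := pv_foldl_set_window pvF s (s.length - 1) (le_refl _)
  unfold pvA_once
  simp only []
  rw [show (fun (acc : List Int) (j : Nat) => acc.set j (PySem.Int.band (PySem.Int.bor ((acc.getD j 0) >>> (1:Nat))
      ((PySem.Int.band (acc.getD (j+1) 0) 1) <<< (31:Nat))) 4294967295))
    = (fun acc j => acc.set j (pvF (acc.getD j 0) (acc.getD (j+1) 0))) from rfl]
  rw [hwin]
  have hlast : s.drop (s.length - 1) = [s[s.length - 1]] := by
    rw [List.drop_eq_getElem_cons (by omega), List.drop_eq_nil_of_le (by omega)]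
  have hZ : List.zipWith pvF (s.take (s.length - 1)) (s.drop 1)
      = List.zipWith pvF s (s.drop 1) :=
    pv_zipWith_take_left pvF s (s.drop 1) (s.length - 1) (by rw [List.length_drop])
  rw [hlast, hZ]
  have hlenz : (List.zipWith pvF s (s.drop 1)).length = s.length - 1 := by
    rw [List.length_zipWith, List.length_drop]
    omega
  have hlen2 : (List.zipWith pvF s (s.drop 1) ++ [s[s.length - 1]]).length = s.length := by
    simp [hlenz]; omega
  rw [hlen2]
  rw [List.set_append_right _ _ (by omega), hlenz]
  rw [List.getD_append_right _ _ _ _ (by omega), hlenz]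
  rw [Nat.sub_self, List.set_cons_zero]
  have hgd0 : s.getD 0 0 = s[0]'(by omega) := by
    simp [List.getD_eq_getElem?_getD, List.getElem?_eq_getElem (by omega : 0 < s.length)]
  have hgdl : ([s[s.length - 1]] : List Int).getD 0 0 = s[s.length - 1] := by simp
  rw [hgd0, hgdl]
  have htake1 : s.take 1 = [s[0]'(by omega)] := by
    rw [List.take_one]
    simp [List.head?_eq_getElem?, List.getElem?_eq_getElem (by omega : 0 < s.length)]
  -- right-hand side: elementwise comparison
  apply List.ext_getElem
  · simp [hlenz]
    omega
  intro i hi1 hi2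
  have hiN : i < s.length := by
    have h := hi1
    simp only [List.length_append, hlenz, List.length_cons, List.length_nil] at h
    omega
  rw [List.getElem_zipWith]
  by_cases hilt : i < s.length - 1
  · rw [List.getElem_append_left (by omega : i < (List.zipWith pvF s (s.drop 1)).length)]
    rw [List.getElem_zipWith]
    have hdrop : (s.drop 1)[i]'(by simp only [List.length_drop]; omega) = s[i+1]'(by omega) := by
      rw [List.getElem_drop]
      congr 1
      omega
    have happ : (s.drop 1 ++ s.take 1)[i]'(by simp only [List.length_append, List.length_drop, List.length_take]; omega)
        = s[i+1]'(by omega) := by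
      rw [List.getElem_append_left (by simp only [List.length_drop]; omega)]
      rw [List.getElem_drop]
      congr 1
      omega
    rw [hdrop, happ]
  · have hieq : i = s.length - 1 := by omega
    subst hieq
    rw [List.getElem_append_right (by omega : (List.zipWith pvF s (s.drop 1)).length ≤ s.length - 1)]
    have happ : (s.drop 1 ++ s.take 1)[s.length - 1]'(by simp only [List.length_append, List.length_drop, List.length_take]; omega)
        = s[0]'(by omega) := by
      rw [List.getElem_append_right (by simp only [List.length_drop]; omega)]
      have hz0 : s.length - 1 - (s.drop 1).length = 0 := by simp only [List.length_drop]; omega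
      simp [htake1, hz0]
    rw [happ]
    have hz : s.length - 1 - (List.zipWith pvF s (s.drop 1)).length = 0 := by omega
    simp only [hz, List.getElem_cons_zero]
    rfl

-- the loop invariant: r passes of A's 1-bit shift compute B's closed form
lemma pv_shift_eq : ∀ (r : Nat), 1 ≤ r → r ≤ 31 → ∀ (s : List Int), s ≠ [] →
    pvA_shift r s
      = List.zipWith (fun x y => ((pvGN r (pvAN x) (pvAN y) : Nat) : Int)) s (s.drop 1 ++ s.take 1) := by
  intro r
  induction r with
  | zero => omega
  | succ r ih =>
    intro _ hr2 s hs
    rcases Nat.eq_zero_or_pos r with h0 | hpos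
    · subst h0
      show pvA_once (pvA_shift 0 s) = _
      rw [show pvA_shift 0 s = s from rfl, pv_once_eq s hs]
      exact pv_zipWith_congr _ _ (fun x y => pvF_eq x y) s _
    · show pvA_once (pvA_shift r s) = _
      rw [ih hpos (by omega) s hs]
      have hlen : s.length = (s.drop 1 ++ s.take 1).length := by
        simp only [List.length_append, List.length_drop, List.length_take]
        omega
      have hzne : List.zipWith (fun x y => ((pvGN r (pvAN x) (pvAN y) : Nat) : Int)) s (s.drop 1 ++ s.take 1) ≠ [] := by
        have : (List.zipWith (fun x y => ((pvGN r (pvAN x) (pvAN y) : Nat) : Int)) s (s.drop 1 ++ s.take 1)).length = s.length := by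
          rw [List.length_zipWith]
          omega
        intro hcon
        rw [hcon] at this
        simp at this
        exact hs (List.length_eq_zero_iff.mp this.symm)
      rw [pv_once_eq _ hzne]
      rw [pv_rot_zipWith _ s _ hlen]
      have hpoint : ∀ x y z : Int,
          pvF ((pvGN r (pvAN x) (pvAN y) : Nat) : Int) ((pvGN r (pvAN y) (pvAN z) : Nat) : Int)
            = ((pvGN (r+1) (pvAN x) (pvAN y) : Nat) : Int) := by
        intro x y z
        rw [pvF_cast, pv_step r hpos (by omega) (pvAN x) (pvAN y) (pvAN z) (by unfold pvAN; omega) (by unfold pvAN; omega)]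
      rw [pv_zipWith_comp (fun a b => pvF a b) (fun x y => ((pvGN r (pvAN x) (pvAN y) : Nat) : Int))
        (fun x y => ((pvGN (r+1) (pvAN x) (pvAN y) : Nat) : Int)) hpoint
        s _ _ hlen (by simp only [List.length_append, List.length_drop, List.length_take]; omega)]

-- ===== VERDICT (by name: the statement is the Claim_ definition above) =====
theorem LongShiftBitsToLow_spec : Claim_equal_LongShiftBitsToLow := by
  intro number ws _
  unfold Spec_LongShiftBitsToLow LongShiftBitsToLow LongShiftBitsToLow_alt
  by_cases h0 : ws ≤ 0
  · simp [h0]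
  · simp only [if_neg h0]
    have hq0 : 0 ≤ PySem.Int.floordiv ws 32 := by
      rw [PySem.Int.floordiv_eq_ediv_of_pos (by norm_num)]
      omega
    have hr0 : 0 ≤ PySem.Int.mod ws 32 := PySem.Int.mod_nonneg ws (by norm_num)
    have hr32 : PySem.Int.mod ws 32 < 32 := PySem.Int.mod_lt ws (by norm_num)
    set q := PySem.Int.floordiv ws 32 with hqd
    set rI := PySem.Int.mod ws 32 with hrd
    have hres : ∀ res : List Int, res ≠ [] →
        (if 0 < rI then pvA_shift rI.toNat res else res)
          = (if 0 < rI then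
              (res.zip (res.drop 1 ++ res.take 1)).map (fun (p : Int × Int) =>
                PySem.Int.bor ((PySem.Int.band p.1 8589934591) >>> rI.toNat)
                  (PySem.Int.band (p.2 <<< (32 - rI.toNat)) 4294967295))
             else res) := by
      intro res hne
      by_cases hrpos : 0 < rI
      · rw [if_pos hrpos, if_pos hrpos,
          pv_zip_map (fun a b => PySem.Int.bor ((PySem.Int.band a 8589934591) >>> rI.toNat)
            (PySem.Int.band (b <<< (32 - rI.toNat)) 4294967295)) res _,
          pv_shift_eq rI.toNat (by omega) (by omega) res hne]
        exact pv_zipWith_congr (fun x y => ((pvGN rI.toNat (pvAN x) (pvAN y) : Nat) : Int))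
          (fun a b => PySem.Int.bor ((PySem.Int.band a 8589934591) >>> rI.toNat)
            (PySem.Int.band (b <<< (32 - rI.toNat)) 4294967295))
          (fun x y => (pvG_eq rI.toNat x y).symm) res (res.drop 1 ++ res.take 1)
      · rw [if_neg hrpos, if_neg hrpos]
    have hne : (if q < (number.length : Int) then PySem.List.slice number (some q) none else [0]) ≠ [] := by
      by_cases hql : q < (number.length : Int)
      · rw [if_pos hql]
        rw [show q = ((q.toNat : Nat) : Int) from by omega, PySem.List.slice_from_natCast]
        intro hcon
        have := congrArg List.length hcon
        simp only [List.length_drop, List.length_nil] at this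
        omega
      · rw [if_neg hql]
        simp
    exact congrArg pvPopTrailing (hres _ hne)
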